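-- pv_equiv track=rewrite | github.com/Sheriffy4/recon | core/pcap_analysis/legacy_compat.py | convert_old_code
-- ===== SOURCE A (Python) =====
-- def convert_old_code(old_code: str) -> str:
--     """
--     Автоматическая конвертация старого кода в новый.
--
--     Args:
--         old_code: Старый код
--
--     Returns:
--         Новый код
--     """
--     new_code = old_code
--
--     # Замена функций
--     replacements = {
--         "create_analyzer(": "IntelligentPCAPAnalyzer(",
--         "analyze_pcap_sync(": "asyncio.run(analyze_pcap_file(",
--         "pcap_analyze(": "asyncio.run(analyze_pcap_file(",
--     }
--
--     for old, new in replacements.items():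
--         new_code = new_code.replace(old, new)
--
--     # Добавление import asyncio если нужно
--     if "asyncio.run(" in new_code and "import asyncio" not in new_code:
--         new_code = "import asyncio\n" + new_code
--
--     return new_code
-- ===== SOURCE B (Python) =====
-- def convert_old_code(old_code: str) -> str:
--     """Single left-to-right scan: at each index try the three old-API keys and emit
--     the replacement (the keys never overlap each other or the replacement texts,
--     so one pass gives the same result as three sequential .replace passes)."""
--     pairs = (
--         ("create_analyzer(", "IntelligentPCAPAnalyzer("),
--         ("analyze_pcap_sync(", "asyncio.run(analyze_pcap_file("),
--         ("pcap_analyze(", "asyncio.run(analyze_pcap_file("),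
--     )
--     out = []
--     i = 0
--     n = len(old_code)
--     while i < n:
--         for old, new in pairs:
--             if old_code.startswith(old, i):
--                 out.append(new)
--                 i += len(old)
--                 break
--         else:
--             out.append(old_code[i])
--             i += 1
--     new_code = "".join(out)
--     if "asyncio.run(" in new_code and "import asyncio" not in new_code:
--         new_code = "import asyncio\n" + new_code
--     return new_code
-- ===== Notes on version B (the rewrite author's own statement) =====
-- stated objective: alternative
-- what changed: Replaces the three sequential whole-string str.replace passes by a single left-to-right scan that tries all three keys at each position (valid because keys and replacements are mutually non-overlapping); the import-asyncio check is unchanged.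
import Mathlib
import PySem

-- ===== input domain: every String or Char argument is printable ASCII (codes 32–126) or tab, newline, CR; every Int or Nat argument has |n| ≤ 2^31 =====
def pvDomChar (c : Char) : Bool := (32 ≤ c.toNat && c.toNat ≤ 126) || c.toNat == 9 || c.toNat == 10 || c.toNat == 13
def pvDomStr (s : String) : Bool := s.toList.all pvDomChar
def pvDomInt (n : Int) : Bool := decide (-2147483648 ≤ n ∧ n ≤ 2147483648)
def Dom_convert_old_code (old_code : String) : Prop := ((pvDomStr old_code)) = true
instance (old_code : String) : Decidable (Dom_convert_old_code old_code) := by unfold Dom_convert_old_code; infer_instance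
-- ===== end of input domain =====

-- B replaces A's three sequential whole-string .replace passes by ONE left-to-right scan
-- trying the three keys at each position (alternative decomposition, same cost class).

-- ===== PORT A =====
-- A: new_code = old_code; for old,new in replacements.items(): new_code = new_code.replace(old,new);
--    then prepend "import asyncio\n" if needed.
def convert_old_code (old_code : String) : String :=
  let replacements : List (String × String) :=
    [("create_analyzer(", "IntelligentPCAPAnalyzer("),
     ("analyze_pcap_sync(", "asyncio.run(analyze_pcap_file("),
     ("pcap_analyze(", "asyncio.run(analyze_pcap_file(")]
  let new_code := replacements.foldl (fun nc p => PySem.Str.replace nc p.1 p.2) old_code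
  if PySem.Str.isIn "asyncio.run(" new_code && !(PySem.Str.isIn "import asyncio" new_code) then
    -- "import asyncio\n" + new_code  (string concatenation, ported on the char-list level)
    String.ofList ("import asyncio\n".toList ++ new_code.toList)
  else new_code

-- ===== PORT B =====
-- B-side helpers: the three keys / replacement texts as char lists
def pvK1 : List Char := "create_analyzer(".toList
def pvR1 : List Char := "IntelligentPCAPAnalyzer(".toList
def pvK2 : List Char := "analyze_pcap_sync(".toList
def pvK3 : List Char := "pcap_analyze(".toList
def pvR2 : List Char := "asyncio.run(analyze_pcap_file(".toList

-- B's while-loop: at each index try key1/key2/key3 (emit replacement, skip key) else copy one char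
def pvScan : List Char → List Char
  | [] => []
  | c :: t =>
    if pvK1 <+: c :: t then pvR1 ++ pvScan ((c :: t).drop pvK1.length)
    else if pvK2 <+: c :: t then pvR2 ++ pvScan ((c :: t).drop pvK2.length)
    else if pvK3 <+: c :: t then pvR2 ++ pvScan ((c :: t).drop pvK3.length)
    else c :: pvScan t
  termination_by l => l.length
  decreasing_by
  · have h1 : 0 < pvK1.length := by decide
    simp only [List.length_drop, List.length_cons]
    omega
  · have h1 : 0 < pvK2.length := by decide
    simp only [List.length_drop, List.length_cons]
    omega
  · have h1 : 0 < pvK3.length := by decide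
    simp only [List.length_drop, List.length_cons]
    omega
  · simp

def convert_old_code_alt (old_code : String) : String :=
  let new_code := String.ofList (pvScan old_code.toList)
  if PySem.Str.isIn "asyncio.run(" new_code && !(PySem.Str.isIn "import asyncio" new_code) then
    String.ofList ("import asyncio\n".toList ++ new_code.toList)
  else new_code

-- ===== PRECONDITION & SPEC =====
def Spec_convert_old_code (old_code : String) (out : String) : Prop := out = convert_old_code_alt old_code
instance (old_code : String) (out : String) : Decidable (Spec_convert_old_code old_code out) := by unfold Spec_convert_old_code; infer_instance

-- ===== CLAIM (what is proved, stated in full; the proofs are below) =====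
def Claim_equal_convert_old_code : Prop := ∀ (old_code : String), Dom_convert_old_code old_code → Spec_convert_old_code old_code (convert_old_code old_code)

-- ===== LEMMAS AND PROOFS =====

-- clean structural form of Python's str.replace for a nonempty pattern
def pvRepC (old new : List Char) : List Char → List Char
  | [] => []
  | c :: t =>
    if old ≠ [] ∧ old <+: c :: t then new ++ pvRepC old new ((c :: t).drop old.length)
    else c :: pvRepC old new t
  termination_by l => l.length
  decreasing_by
  · rename_i h; simp [List.length_drop]
    have : 0 < old.length := List.length_pos_iff.mpr h.1
    omega
  · simp

-- "no occurrence of k starts inside a": every nonempty suffix of a is prefix-incomparable with k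
def pvNC (a k : List Char) : Prop :=
  ∀ i < a.length, ¬(a.drop i <+: k) ∧ ¬(k <+: a.drop i)

lemma pv_go_eq (old new : List Char) (hold : old ≠ []) :
    ∀ (fuel : Nat) (l acc : List Char), l.length ≤ fuel →
      PySem.Chars.replace.go old new fuel l acc = acc.reverse ++ pvRepC old new l := by
  intro fuel
  induction fuel with
  | zero =>
    intro l acc h
    have hl : l = [] := by cases l with
      | nil => rfl
      | cons c t => simp at h
    subst hl
    rw [PySem.Chars.replace.go]
    simp [pvRepC]
  | succ f ih =>
    intro l acc h
    cases l with
    | nil =>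
      rw [PySem.Chars.replace.go]
      all_goals simp [pvRepC]
    | cons c t =>
      have h' : t.length + 1 ≤ f + 1 := by simpa using h
      rw [PySem.Chars.replace.go]
      by_cases hp : old.isPrefixOf (c :: t) = true
      · rw [if_pos hp]
        have hpre : old <+: c :: t := List.isPrefixOf_iff_prefix.mp hp
        have hlen : 0 < old.length := List.length_pos_iff.mpr hold
        rw [ih ((c :: t).drop old.length) (new.reverse ++ acc)
            (by simp only [List.length_drop, List.length_cons]; omega)]
        rw [pvRepC, if_pos ⟨hold, hpre⟩]
        simp
      · rw [if_neg hp]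
        have hnp : ¬ old <+: c :: t := fun hc => hp (List.isPrefixOf_iff_prefix.mpr hc)
        rw [ih t (c :: acc) (by omega)]
        rw [pvRepC, if_neg (by tauto)]
        simp

lemma pv_replace_eq (l old new : List Char) (hold : old ≠ []) :
    PySem.Chars.replace l old new = pvRepC old new l := by
  unfold PySem.Chars.replace
  rw [if_neg (by simp [List.isEmpty_iff, hold])]
  simpa using pv_go_eq old new hold l.length l [] (le_refl _)

-- a pattern cannot match starting anywhere inside a: replace skips over a
lemma pv_repC_append (k r a x : List Char) (h : pvNC a k) :
    pvRepC k r (a ++ x) = a ++ pvRepC k r x := by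
  induction a with
  | nil => simp
  | cons c t iht =>
    have h0 := h 0 (by simp)
    simp only [List.drop_zero] at h0
    have hnp : ¬ k <+: (c :: t) ++ x := by
      intro hc
      rcases List.prefix_or_prefix_of_prefix hc (List.prefix_append (c :: t) x) with h1 | h1
      · exact h0.2 h1
      · exact h0.1 h1
    rw [List.cons_append, pvRepC, if_neg (by rw [← List.cons_append]; tauto)]
    rw [iht (fun i hi => by
      have := h (i + 1) (by simpa using Nat.succ_lt_succ hi)
      simpa using this)]
    simp

lemma pv_repC_prefix (k r t : List Char) (hk : k ≠ []) :
    pvRepC k r (k ++ t) = r ++ pvRepC k r t := by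
  cases k with
  | nil => exact absurd rfl hk
  | cons d k' =>
    rw [List.cons_append, pvRepC, if_pos ⟨by simp, by rw [← List.cons_append]; exact List.prefix_append _ _⟩]
    congr 1
    rw [← List.cons_append, List.drop_left]

-- prefix transfer: rewriting k'→r' neither creates nor destroys a front match of any suffix of k
lemma pv_transfer (k' r' k : List Char) (hk' : k' ≠ []) (h1 : pvNC k k') (h2 : pvNC k r') :
    ∀ (l p : List Char), p <:+ k → (p <+: pvRepC k' r' l ↔ p <+: l) := by
  suffices H : ∀ (n : Nat) (l : List Char), l.length = n →
      ∀ p, p <:+ k → (p <+: pvRepC k' r' l ↔ p <+: l) by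
    intro l p hp; exact H l.length l rfl p hp
  intro n
  induction n using Nat.strong_induction_on with
  | _ n ih =>
    intro l hl p hp
    cases l with
    | nil => simp [pvRepC]
    | cons c t =>
      by_cases hpre : k' <+: c :: t
      · obtain ⟨t', ht'⟩ := hpre
        have hguard : k' ≠ [] ∧ k' <+: c :: t := ⟨hk', ⟨t', ht'⟩⟩
        rw [pvRepC, if_pos hguard]
        have hd : (c :: t).drop k'.length = t' := by rw [← ht']; exact List.drop_left
        rw [hd, ← ht']
        rcases eq_or_ne p [] with rfl | hpne
        · simp
        · -- p a nonempty suffix of k: incomparable with both k' and r'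
          have hip : p = k.drop (k.length - p.length) := List.suffix_iff_eq_drop.mp hp
          have hilt : k.length - p.length < k.length := by
            have h1p : 0 < p.length := List.length_pos_iff.mpr hpne
            have := hp.length_le
            omega
          have hk1 := h1 (k.length - p.length) hilt
          have hk2 := h2 (k.length - p.length) hilt
          rw [← hip] at hk1 hk2
          constructor
          · intro hc
            rcases List.prefix_or_prefix_of_prefix hc (List.prefix_append r' _) with hx | hx
            · exact absurd hx hk2.1
            · exact absurd hx hk2.2
          · intro hc
            rcases List.prefix_or_prefix_of_prefix hc (List.prefix_append k' t') with hx | hx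
            · exact absurd hx hk1.1
            · exact absurd hx hk1.2
      · rw [pvRepC, if_neg (by tauto)]
        cases p with
        | nil => simp
        | cons d p' =>
          rw [List.cons_prefix_cons, List.cons_prefix_cons]
          have hp' : p' <:+ k := (List.suffix_cons d p').trans hp
          have := ih t.length (by simp [← hl]) t rfl p' hp'
          tauto

-- transfer through a cons cell: k matches at the very front of c :: (replace k' r' t) iff at c :: t
lemma pv_cons_transfer (k' r' k : List Char) (hk' : k' ≠ []) (h1 : pvNC k k') (h2 : pvNC k r')
    (c : Char) (t : List Char) :
    (k <+: c :: pvRepC k' r' t) ↔ (k <+: c :: t) := by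
  cases k with
  | nil => simp
  | cons d k'' =>
    rw [List.cons_prefix_cons, List.cons_prefix_cons,
        pv_transfer k' r' (d :: k'') hk' h1 h2 t k'' (List.suffix_cons d k'')]

lemma pvScan_cons (c : Char) (t : List Char) :
    pvScan (c :: t) =
      if pvK1 <+: c :: t then pvR1 ++ pvScan ((c :: t).drop pvK1.length)
      else if pvK2 <+: c :: t then pvR2 ++ pvScan ((c :: t).drop pvK2.length)
      else if pvK3 <+: c :: t then pvR2 ++ pvScan ((c :: t).drop pvK3.length)
      else c :: pvScan t := by
  rw [pvScan.eq_def]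

-- the concrete disjointness facts (checked by the kernel)
lemma pvNC_r1_k2 : pvNC pvR1 pvK2 := by unfold pvNC; decide
lemma pvNC_r1_k3 : pvNC pvR1 pvK3 := by unfold pvNC; decide
lemma pvNC_k2_k1 : pvNC pvK2 pvK1 := by unfold pvNC; decide
lemma pvNC_k2_r1 : pvNC pvK2 pvR1 := by unfold pvNC; decide
lemma pvNC_k3_k1 : pvNC pvK3 pvK1 := by unfold pvNC; decide
lemma pvNC_k3_k2 : pvNC pvK3 pvK2 := by unfold pvNC; decide
lemma pvNC_k3_r1 : pvNC pvK3 pvR1 := by unfold pvNC; decide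
lemma pvNC_k3_r2 : pvNC pvK3 pvR2 := by unfold pvNC; decide
lemma pvNC_r2_k3 : pvNC pvR2 pvK3 := by unfold pvNC; decide

-- main lemma: the three sequential replaces equal the single scan
lemma pv_main : ∀ (l : List Char),
    pvRepC pvK3 pvR2 (pvRepC pvK2 pvR2 (pvRepC pvK1 pvR1 l)) = pvScan l := by
  suffices H : ∀ (n : Nat) (l : List Char), l.length = n →
      pvRepC pvK3 pvR2 (pvRepC pvK2 pvR2 (pvRepC pvK1 pvR1 l)) = pvScan l by
    intro l; exact H l.length l rfl
  intro n
  induction n using Nat.strong_induction_on with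
  | _ n ih =>
    intro l hl
    cases l with
    | nil => simp [pvRepC, pvScan]
    | cons c t0 =>
      by_cases hA : pvK1 <+: c :: t0
      · obtain ⟨t, ht⟩ := hA
        have hd : (c :: t0).drop pvK1.length = t := by rw [← ht]; exact List.drop_left
        have hlen : t.length < n := by
          have := congrArg List.length ht
          simp [List.length_append] at this
          have h1 : 0 < pvK1.length := by decide
          simp at hl; omega
        rw [← ht, pv_repC_prefix _ _ _ (by decide),
            pv_repC_append _ _ _ _ pvNC_r1_k2, pv_repC_append _ _ _ _ pvNC_r1_k3,
            ih t.length hlen t rfl]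
        rw [ht, pvScan_cons, if_pos ⟨t, ht⟩, hd]
      · by_cases hB : pvK2 <+: c :: t0
        · obtain ⟨t, ht⟩ := hB
          have hd : (c :: t0).drop pvK2.length = t := by rw [← ht]; exact List.drop_left
          have hlen : t.length < n := by
            have := congrArg List.length ht
            simp [List.length_append] at this
            have h1 : 0 < pvK2.length := by decide
            simp at hl; omega
          rw [← ht, pv_repC_append _ _ _ _ pvNC_k2_k1,
              pv_repC_prefix _ _ _ (by decide), pv_repC_append _ _ _ _ pvNC_r2_k3,
              ih t.length hlen t rfl]
          rw [ht, pvScan_cons, if_neg hA, if_pos ⟨t, ht⟩, hd]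
        · by_cases hC : pvK3 <+: c :: t0
          · obtain ⟨t, ht⟩ := hC
            have hd : (c :: t0).drop pvK3.length = t := by rw [← ht]; exact List.drop_left
            have hlen : t.length < n := by
              have := congrArg List.length ht
              simp [List.length_append] at this
              have h1 : 0 < pvK3.length := by decide
              simp at hl; omega
            rw [← ht, pv_repC_append _ _ _ _ pvNC_k3_k1,
                pv_repC_append _ _ _ _ pvNC_k3_k2, pv_repC_prefix _ _ _ (by decide),
                ih t.length hlen t rfl]
            rw [ht, pvScan_cons, if_neg hA, if_neg hB, if_pos ⟨t, ht⟩, hd]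
          · have e1 : pvRepC pvK1 pvR1 (c :: t0) = c :: pvRepC pvK1 pvR1 t0 := by
              rw [pvRepC, if_neg (by tauto)]
            have hB' : ¬ pvK2 <+: c :: pvRepC pvK1 pvR1 t0 := by
              rw [pv_cons_transfer pvK1 pvR1 pvK2 (by decide) pvNC_k2_k1 pvNC_k2_r1]
              exact hB
            have e2 : pvRepC pvK2 pvR2 (c :: pvRepC pvK1 pvR1 t0)
                = c :: pvRepC pvK2 pvR2 (pvRepC pvK1 pvR1 t0) := by
              rw [pvRepC, if_neg (by tauto)]
            have hC' : ¬ pvK3 <+: c :: pvRepC pvK2 pvR2 (pvRepC pvK1 pvR1 t0) := by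
              rw [pv_cons_transfer pvK2 pvR2 pvK3 (by decide) pvNC_k3_k2 pvNC_k3_r2,
                  pv_cons_transfer pvK1 pvR1 pvK3 (by decide) pvNC_k3_k1 pvNC_k3_r1]
              exact hC
            have e3 : pvRepC pvK3 pvR2 (c :: pvRepC pvK2 pvR2 (pvRepC pvK1 pvR1 t0))
                = c :: pvRepC pvK3 pvR2 (pvRepC pvK2 pvR2 (pvRepC pvK1 pvR1 t0)) := by
              rw [pvRepC, if_neg (by tauto)]
            rw [e1, e2, e3, ih t0.length (by simp at hl; omega) t0 rfl]
            rw [pvScan_cons, if_neg hA, if_neg hB, if_neg hC]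

lemma pv_chain (l : List Char) :
    PySem.Chars.replace (PySem.Chars.replace (PySem.Chars.replace l pvK1 pvR1) pvK2 pvR2) pvK3 pvR2
      = pvScan l := by
  rw [pv_replace_eq _ _ _ (by decide), pv_replace_eq _ _ _ (by decide),
      pv_replace_eq _ _ _ (by decide), pv_main]

-- ===== VERDICT (by name: the statement is the Claim_ definition above) =====
theorem convert_old_code_spec : Claim_equal_convert_old_code := by
  intro s _
  unfold Spec_convert_old_code convert_old_code convert_old_code_alt
  simp only [List.foldl, PySem.Str.replace]
  have hnc : String.ofList
      (PySem.Chars.replace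
        ((String.ofList (PySem.Chars.replace
            ((String.ofList (PySem.Chars.replace s.toList "create_analyzer(".toList
                "IntelligentPCAPAnalyzer(".toList)).toList)
            "analyze_pcap_sync(".toList "asyncio.run(analyze_pcap_file(".toList)).toList)
        "pcap_analyze(".toList "asyncio.run(analyze_pcap_file(".toList)
      = String.ofList (pvScan s.toList) := by
    simp only [String.toList_ofList]
    rw [show ("create_analyzer(".toList) = pvK1 from rfl,
        show ("IntelligentPCAPAnalyzer(".toList) = pvR1 from rfl,
        show ("analyze_pcap_sync(".toList) = pvK2 from rfl,
        show ("pcap_analyze(".toList) = pvK3 from rfl,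
        show ("asyncio.run(analyze_pcap_file(".toList) = pvR2 from rfl,
        pv_chain]
  rw [hnc]
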